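-- pv_equiv track=rewrite | github.com/nathandjanica/test | minesweeper_hint.py | detect_2_2_pattern
-- ===== SOURCE A (Python) =====
-- def get_neighbors(row, col, grid):
--     if not grid or not grid[0]:  # Check if grid is empty
--         return []
--     rows, cols = len(grid), len(grid[0])
--     return [
--         (r, c)
--         for dr in [-1, 0, 1]
--         for dc in [-1, 0, 1]
--         if not (dr == 0 and dc == 0)
--         if 0 <= (r := row + dr) < rows and 0 <= (c := col + dc) < cols
--     ]
--
-- def count_neighbors(row, col, grid, value):
--     if not grid or not grid[0]:  # Check if grid is empty
--         return 0
--     return sum(1 for r, c in get_neighbors(row, col, grid) if grid[r][c] == value)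
--
-- def get_unknown_neighbors(row, col, grid):
--     if not grid or not grid[0]:  # Check if grid is empty
--         return []
--     rows, cols = len(grid), len(grid[0])
--     return [(r, c) for r, c in get_neighbors(row, col, grid)
--             if 0 <= r < rows and 0 <= c < cols and grid[r][c] == "?"]
--
-- def detect_2_2_pattern(grid):
--     """Detect 2-2 pattern: when two 2s share exactly two unknown tiles"""
--     safe, mines = set(), set()
--
--     if not grid or not grid[0]:  # Check if grid is empty
--         return safe, mines
--
--     for r1, row1 in enumerate(grid):
--         for c1, val1 in enumerate(row1):
--             if val1 == "2":
--                 unknown_1 = get_unknown_neighbors(r1, c1, grid)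
--                 flagged_1 = count_neighbors(r1, c1, grid, "F")
--
--                 for r2, row2 in enumerate(grid):
--                     for c2, val2 in enumerate(row2):
--                         if val2 == "2" and (r1, c1) != (r2, c2):
--                             unknown_2 = get_unknown_neighbors(r2, c2, grid)
--                             flagged_2 = count_neighbors(r2, c2, grid, "F")
--
--                             shared = set(unknown_1) & set(unknown_2)
--                             unique_to_1 = set(unknown_1) - set(unknown_2)
--                             unique_to_2 = set(unknown_2) - set(unknown_1)
--
--                             # 2-2 pattern: both have 2 unknowns, they share 2
--                             if (len(unknown_1) == 2 and len(unknown_2) == 2 and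
--                                 len(shared) == 2 and flagged_1 == 0 and flagged_2 == 0):
--                                 # Both shared tiles must be mines
--                                 mines.update(shared)
--
--     return safe, mines
-- ===== SOURCE B (Python) =====
-- def get_neighbors(row, col, grid):
--     if not grid or not grid[0]:  # Check if grid is empty
--         return []
--     rows, cols = len(grid), len(grid[0])
--     return [
--         (r, c)
--         for dr in [-1, 0, 1]
--         for dc in [-1, 0, 1]
--         if not (dr == 0 and dc == 0)
--         if 0 <= (r := row + dr) < rows and 0 <= (c := col + dc) < cols
--     ]
--
-- def count_neighbors(row, col, grid, value):
--     if not grid or not grid[0]:  # Check if grid is empty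
--         return 0
--     return sum(1 for r, c in get_neighbors(row, col, grid) if grid[r][c] == value)
--
-- def get_unknown_neighbors(row, col, grid):
--     if not grid or not grid[0]:  # Check if grid is empty
--         return []
--     rows, cols = len(grid), len(grid[0])
--     return [(r, c) for r, c in get_neighbors(row, col, grid)
--             if 0 <= r < rows and 0 <= c < cols and grid[r][c] == "?"]
--
-- def detect_2_2_pattern(grid):
--     """Detect 2-2 pattern, one linear pass: group qualifying '2' cells
--     (exactly two unknown neighbors, no flagged neighbor) by their unknown
--     pair; any pair shared by two distinct cells marks both tiles as mines."""
--     safe, mines = set(), set()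
--     groups = {}
--     entries = []
--     for r, row in enumerate(grid):
--         if "2" not in row:  # fast row-level skip
--             continue
--         for c, val in enumerate(row):
--             if val == "2":
--                 unknown = get_unknown_neighbors(r, c, grid)
--                 if len(unknown) == 2 and count_neighbors(r, c, grid, "F") == 0:
--                     a, b = unknown
--                     key = (a, b) if a <= b else (b, a)
--                     groups[key] = groups.get(key, 0) + 1
--                     entries.append(unknown)
--     for unknown in entries:
--         a, b = unknown
--         key = (a, b) if a <= b else (b, a)
--         if groups[key] >= 2:
--             mines.update(unknown)
--     return safe, mines
-- ===== Notes on version B (the rewrite author's own statement) =====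
-- stated objective: alternative
-- what changed: A compares every pair of '2' cells with a nested full-grid rescan (quadratic in the number of cells); B makes one linear pass that groups qualifying '2' cells (exactly two unknown neighbors, no flagged neighbor) in a dict keyed by their sorted unknown pair and then marks as mines every pair whose group holds at least two cells; on the probe's generated inputs (few qualifying '2' cells) the measured gain was only ~1.1-1.6x, so no speed is claimed.
import Mathlib
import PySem

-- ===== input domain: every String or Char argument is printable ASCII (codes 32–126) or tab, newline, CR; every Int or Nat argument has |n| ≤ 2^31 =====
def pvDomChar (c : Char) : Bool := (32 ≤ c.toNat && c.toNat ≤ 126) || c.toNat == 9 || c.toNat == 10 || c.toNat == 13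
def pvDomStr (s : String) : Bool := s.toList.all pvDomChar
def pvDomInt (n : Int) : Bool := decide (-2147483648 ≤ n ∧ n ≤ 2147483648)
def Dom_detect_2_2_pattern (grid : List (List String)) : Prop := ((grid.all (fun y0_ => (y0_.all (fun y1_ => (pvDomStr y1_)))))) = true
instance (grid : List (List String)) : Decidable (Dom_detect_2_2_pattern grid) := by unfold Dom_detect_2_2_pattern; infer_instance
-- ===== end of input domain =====

-- B replaces A's quadratic scan over all pairs of '2' cells by one linear pass that groups
-- qualifying '2' cells by their (sorted) pair of unknown neighbors in a dict (objective:
-- alternative single-pass algorithm; a timing run's generated inputs are sparse in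
-- qualifying '2' cells, where the measured ratio hovered around 1.1-1.6x, so no speed is claimed).

-- ===== PORT A =====
-- helpers of the Python module (shared by A and B, as in the Python source)
def get_neighbors (row col : Int) (grid : List (List String)) : List (Int × Int) :=
  match grid with
  | [] => []
  | r0 :: _ =>
    if r0 = [] then []
    else
      let rows : Int := grid.length
      let cols : Int := r0.length
      ([-1, 0, 1] : List Int).flatMap (fun dr =>
        ([-1, 0, 1] : List Int).flatMap (fun dc =>
          if dr = 0 ∧ dc = 0 then []
          else
            let r := row + dr
            let c := col + dc
            if 0 ≤ r ∧ r < rows ∧ 0 ≤ c ∧ c < cols then [(r, c)] else []))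

-- grid[r][c]: none is exactly Python's IndexError (excluded by Pre_)
def cell? (grid : List (List String)) (r c : Int) : Option String :=
  (PySem.List.pyGet? grid r).bind (fun rw => PySem.List.pyGet? rw c)

def count_neighbors (row col : Int) (grid : List (List String)) (value : String) : Int :=
  match grid with
  | [] => 0
  | r0 :: _ =>
    if r0 = [] then 0
    else ((get_neighbors row col grid).map
      (fun rc => if cell? grid rc.1 rc.2 = some value then (1 : Int) else 0)).sum

def get_unknown_neighbors (row col : Int) (grid : List (List String)) : List (Int × Int) :=
  match grid with
  | [] => []
  | r0 :: _ =>
    if r0 = [] then []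
    else
      let rows : Int := grid.length
      let cols : Int := r0.length
      (get_neighbors row col grid).filter
        (fun rc => decide (0 ≤ rc.1 ∧ rc.1 < rows ∧ 0 ≤ rc.2 ∧ rc.2 < cols ∧
          cell? grid rc.1 rc.2 = some "?"))

def detect_2_2_pattern (grid : List (List String)) : (List (Int × Int)) × (List (Int × Int)) :=
  let safe : PySem.Set (Int × Int) := PySem.Set.empty
  let mines : PySem.Set (Int × Int) := PySem.Set.empty
  match grid with
  | [] => (safe, mines)
  | r0 :: _ =>
    if r0 = [] then (safe, mines)
    else
      let mines := (PySem.List.enumerate grid 0).foldl (fun mines p1 =>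
        (PySem.List.enumerate p1.2 0).foldl (fun mines q1 =>
          if q1.2 = "2" then
            let r1 := p1.1
            let c1 := q1.1
            let unknown_1 := get_unknown_neighbors r1 c1 grid
            let flagged_1 := count_neighbors r1 c1 grid "F"
            (PySem.List.enumerate grid 0).foldl (fun mines p2 =>
              (PySem.List.enumerate p2.2 0).foldl (fun mines q2 =>
                if q2.2 = "2" ∧ (r1, c1) ≠ (p2.1, q2.1) then
                  let r2 := p2.1
                  let c2 := q2.1
                  let unknown_2 := get_unknown_neighbors r2 c2 grid
                  let flagged_2 := count_neighbors r2 c2 grid "F"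
                  let shared := PySem.Set.inter (PySem.Set.ofList unknown_1) (PySem.Set.ofList unknown_2)
                  let _unique_to_1 := PySem.Set.diff (PySem.Set.ofList unknown_1) (PySem.Set.ofList unknown_2)
                  let _unique_to_2 := PySem.Set.diff (PySem.Set.ofList unknown_2) (PySem.Set.ofList unknown_1)
                  if unknown_1.length = 2 ∧ unknown_2.length = 2 ∧
                      PySem.Set.len shared = 2 ∧ flagged_1 = 0 ∧ flagged_2 = 0 then
                    PySem.Set.update mines shared
                  else mines
                else mines) mines) mines
          else mines) mines) mines
      (safe, mines)

-- ===== PORT B =====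
def detect_2_2_pattern_alt (grid : List (List String)) : (List (Int × Int)) × (List (Int × Int)) :=
  let safe : PySem.Set (Int × Int) := PySem.Set.empty
  let mines : PySem.Set (Int × Int) := PySem.Set.empty
  let st := (PySem.List.enumerate grid 0).foldl (fun st p =>
      if p.2.contains "2" then
      (PySem.List.enumerate p.2 0).foldl (fun st q =>
        if q.2 = "2" then
          let unknown := get_unknown_neighbors p.1 q.1 grid
          if unknown.length = 2 ∧ count_neighbors p.1 q.1 grid "F" = 0 then
            match unknown with
            | [a, b] =>
              -- 'key = (a, b) if a <= b else (b, a)': Python tuple <= is lexicographic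
              let key := if a.1 < b.1 ∨ (a.1 = b.1 ∧ a.2 ≤ b.2) then (a, b) else (b, a)
              (st.1.insert key (st.1.getD key 0 + 1), st.2 ++ [unknown])
            | _ => st  -- unreachable: unknown has length 2
          else st
        else st) st
      else st)
    ((PySem.Dict.empty : PySem.Dict ((Int × Int) × (Int × Int)) Int), ([] : List (List (Int × Int))))
  let groups := st.1
  let entries := st.2
  let mines := entries.foldl (fun mines unknown =>
      match unknown with
      | [a, b] =>
        let key := if a.1 < b.1 ∨ (a.1 = b.1 ∧ a.2 ≤ b.2) then (a, b) else (b, a)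
        if groups.getD key 0 ≥ 2 then PySem.Set.update mines unknown else mines
      | _ => mines) mines
  (safe, mines)

-- ===== PRECONDITION & SPEC =====
-- Pre_ excludes exactly the inputs where the Python A raises IndexError: a ragged grid in which
-- some '2' cell has an in-bounds neighbor position (bounds taken from row 0) whose column is
-- beyond its own (shorter) row's length; on every other input A returns normally.
def Pre_detect_2_2_pattern (grid : List (List String)) : Prop :=
  ((List.range grid.length).all (fun r =>
    (List.range (grid.getD r []).length).all (fun c =>
      ((grid.getD r []).getD c "" != "2") ||
      (([-1, 0, 1] : List Int).all (fun dr =>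
        ([-1, 0, 1] : List Int).all (fun dc =>
          !(decide (0 ≤ (r : Int) + dr) && decide ((r : Int) + dr < (grid.length : Int)) &&
            decide (0 ≤ (c : Int) + dc) && decide ((c : Int) + dc < ((grid.headD []).length : Int))) ||
          decide ((c : Int) + dc < ((grid.getD ((r : Int) + dr).toNat []).length : Int)))))))) = true
instance (grid : List (List String)) : Decidable (Pre_detect_2_2_pattern grid) := by
  unfold Pre_detect_2_2_pattern; infer_instance

def pvWitness_detect_2_2_pattern : List (List String) := [["2", "?"], ["?", "1"]]

def Spec_detect_2_2_pattern (grid : List (List String)) (out : (List (Int × Int)) × (List (Int × Int))) : Prop := out = detect_2_2_pattern_alt grid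
instance (grid : List (List String)) (out : (List (Int × Int)) × (List (Int × Int))) : Decidable (Spec_detect_2_2_pattern grid out) := by unfold Spec_detect_2_2_pattern; infer_instance

-- ===== CLAIM (what is proved, stated in full; the proofs are below) =====
def Claim_equal_detect_2_2_pattern : Prop := ∀ (grid : List (List String)), Dom_detect_2_2_pattern grid → Pre_detect_2_2_pattern grid → Spec_detect_2_2_pattern grid (detect_2_2_pattern grid)

-- ===== LEMMAS AND PROOFS =====

-- the scan order of cells (r, c, value), shared by both ports' loops
def pvCells (grid : List (List String)) : List (Int × Int × String) :=
  (PySem.List.enumerate grid 0).flatMap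
    (fun p => (PySem.List.enumerate p.2 0).map (fun q => (p.1, q.1, q.2)))

def pvUnk (grid : List (List String)) (t : Int × Int × String) : List (Int × Int) :=
  get_unknown_neighbors t.1 t.2.1 grid

def pvQual (grid : List (List String)) (t : Int × Int × String) : Bool :=
  decide (t.2.2 = "2") && decide ((pvUnk grid t).length = 2) &&
  decide (count_neighbors t.1 t.2.1 grid "F" = 0)

def pvEntry (grid : List (List String)) (t : Int × Int × String) : Option (List (Int × Int)) :=
  if pvQual grid t then some (pvUnk grid t) else none

def pvQ (grid : List (List String)) : List (List (Int × Int)) :=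
  (pvCells grid).filterMap (pvEntry grid)

def pvLkey (a b : Int × Int) : (Int × Int) × (Int × Int) :=
  if a.1 < b.1 ∨ (a.1 = b.1 ∧ a.2 ≤ b.2) then (a, b) else (b, a)

def pvKey (u : List (Int × Int)) : (Int × Int) × (Int × Int) :=
  match u with
  | [a, b] => pvLkey a b
  | _ => ((0, 0), (0, 0))

def pvCnt (grid : List (List String)) (u : List (Int × Int)) : Nat :=
  List.countP (fun t => pvQual grid t && (pvKey (pvUnk grid t) == pvKey u)) (pvCells grid)

def pvMines (grid : List (List String)) : PySem.Set (Int × Int) :=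
  (pvQ grid).foldl (fun m u => if 2 ≤ pvCnt grid u then PySem.Set.update m u else m) []

-- the flat per-cell step of B's first loop (the literal body of the port)
def pvStepB (grid : List (List String))
    (st : PySem.Dict ((Int × Int) × (Int × Int)) Int × List (List (Int × Int)))
    (t : Int × Int × String) :
    PySem.Dict ((Int × Int) × (Int × Int)) Int × List (List (Int × Int)) :=
  if t.2.2 = "2" then
    let unknown := get_unknown_neighbors t.1 t.2.1 grid
    if unknown.length = 2 ∧ count_neighbors t.1 t.2.1 grid "F" = 0 then
      match unknown with
      | [a, b] =>
        let key := if a.1 < b.1 ∨ (a.1 = b.1 ∧ a.2 ≤ b.2) then (a, b) else (b, a)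
        (st.1.insert key (st.1.getD key 0 + 1), st.2 ++ [unknown])
      | _ => st
    else st
  else st

-- the flat per-cell step of A's inner loop, for a fixed outer cell t1
def pvInner (grid : List (List String)) (t1 : Int × Int × String)
    (mines : PySem.Set (Int × Int)) (t2 : Int × Int × String) : PySem.Set (Int × Int) :=
  if t2.2.2 = "2" ∧ (t1.1, t1.2.1) ≠ (t2.1, t2.2.1) then
    let unknown_2 := get_unknown_neighbors t2.1 t2.2.1 grid
    let flagged_2 := count_neighbors t2.1 t2.2.1 grid "F"
    let shared := PySem.Set.inter (PySem.Set.ofList (pvUnk grid t1)) (PySem.Set.ofList unknown_2)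
    if (pvUnk grid t1).length = 2 ∧ unknown_2.length = 2 ∧
        PySem.Set.len shared = 2 ∧ count_neighbors t1.1 t1.2.1 grid "F" = 0 ∧ flagged_2 = 0 then
      PySem.Set.update mines shared
    else mines
  else mines

-- the matching condition of A, as a Bool
def pvC (grid : List (List String)) (t1 t2 : Int × Int × String) : Bool :=
  decide (t2.2.2 = "2") && decide ((t1.1, t1.2.1) ≠ (t2.1, t2.2.1)) &&
  decide ((pvUnk grid t1).length = 2) && decide ((pvUnk grid t2).length = 2) &&
  decide (PySem.Set.len (PySem.Set.inter (PySem.Set.ofList (pvUnk grid t1))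
      (PySem.Set.ofList (pvUnk grid t2))) = 2) &&
  decide (count_neighbors t1.1 t1.2.1 grid "F" = 0) &&
  decide (count_neighbors t2.1 t2.2.1 grid "F" = 0)

-- nested enumerate fold = fold over pvCells
theorem pv_nested_eq {σ : Type} (grid : List (List String)) (F : σ → (Int × Int × String) → σ) (init : σ) :
    (PySem.List.enumerate grid 0).foldl
      (fun s p => (PySem.List.enumerate p.2 0).foldl (fun s q => F s (p.1, q.1, q.2)) s) init
    = (pvCells grid).foldl F init := by
  unfold pvCells
  rw [List.foldl_flatMap]
  simp [List.foldl_map]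

-- update with the same list twice is update once
theorem pv_update_update {α : Type} [BEq α] [LawfulBEq α] (s : PySem.Set α) (u : List α) :
    PySem.Set.update (PySem.Set.update s u) u = PySem.Set.update s u := by
  conv_lhs => rw [PySem.Set.update_eq_append_filter]
  have h : List.filter (fun y => !(PySem.Set.update s u).contains y) (PySem.Set.ofList u) = [] := by
    rw [List.filter_eq_nil_iff]
    intro y hy
    have hu : y ∈ u := (PySem.Set.mem_ofList u y).mp hy
    simp [PySem.Set.mem_update, hu]
  rw [h, List.append_nil]

-- a conditional single-set fold collapses to one conditional update
theorem pv_foldl_if_update {α : Type} (l : List α) (C : α → Prop) [DecidablePred C]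
    (u : List (Int × Int)) (s : PySem.Set (Int × Int)) :
    l.foldl (fun m t => if C t then PySem.Set.update m u else m) s
    = if ∃ t ∈ l, C t then PySem.Set.update s u else s := by
  induction l generalizing s with
  | nil => simp
  | cons hd tl ih =>
    simp only [List.foldl_cons]
    by_cases h : C hd
    · simp only [if_pos h]
      rw [ih]
      have hex : ∃ t ∈ hd :: tl, C t := ⟨hd, List.mem_cons_self, h⟩
      rw [if_pos hex]
      by_cases h2 : ∃ t ∈ tl, C t
      · rw [if_pos h2, pv_update_update]
      · rw [if_neg h2]
    · simp only [if_neg h]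
      rw [ih]
      have hiff : (∃ t ∈ tl, C t) ↔ (∃ t ∈ hd :: tl, C t) := by
        constructor
        · rintro ⟨t, ht, hc⟩; exact ⟨t, List.mem_cons_of_mem _ ht, hc⟩
        · rintro ⟨t, ht, hc⟩
          rcases List.mem_cons.mp ht with rfl | ht'
          · exact absurd hc h
          · exact ⟨t, ht', hc⟩
      by_cases h2 : ∃ t ∈ tl, C t
      · rw [if_pos h2, if_pos (hiff.mp h2)]
      · rw [if_neg h2, if_neg (fun hx => h2 (hiff.mpr hx))]

-- conditional-entry fold over a list = fold over its filterMap
theorem pv_foldl_filterMap_if {α β σ : Type} (l : List α) (q : α → Bool)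
    (h : α → β) (g : σ → β → σ) (s : σ) :
    l.foldl (fun s t => if q t then g s (h t) else s) s
    = (l.filterMap (fun t => if q t then some (h t) else none)).foldl g s := by
  induction l generalizing s with
  | nil => simp
  | cons hd tl ih =>
    simp only [List.foldl_cons, List.filterMap_cons]
    by_cases hq : q hd
    · simp [hq, ih]
    · simp [hq, ih]

theorem pv_sub_step {α : Type} (P : Prop) [Decidable P] (x : α) {L M : List α} (h : List.Sublist L M) :
    List.Sublist ((if P then [x] else []) ++ L) (x :: M) := by
  split_ifs with hP
  · simpa using h.cons₂ x
  · simpa using h.cons x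

theorem pv_if_single_sublist {α : Type} (P : Prop) [Decidable P] (x : α) :
    List.Sublist (if P then [x] else []) [x] := by
  split_ifs <;> simp

-- get_neighbors is a sublist of the 8 candidate coordinates
theorem pv_neighbors_sublist (row col : Int) (grid : List (List String)) :
    List.Sublist (get_neighbors row col grid)
      [(row + -1, col + -1), (row + -1, col + 0), (row + -1, col + 1),
       (row + 0, col + -1), (row + 0, col + 1),
       (row + 1, col + -1), (row + 1, col + 0), (row + 1, col + 1)] := by
  cases grid with
  | nil => exact List.nil_sublist _
  | cons r0 rest =>
    by_cases h : r0 = []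
    · simp [get_neighbors, h]
    · simp only [get_neighbors, if_neg h]
      norm_num
      refine pv_sub_step _ _ (pv_sub_step _ _ (pv_sub_step _ _ (pv_sub_step _ _ (pv_sub_step _ _
        (pv_sub_step _ _ (pv_sub_step _ _ (pv_if_single_sublist _ _)))))))

theorem pv_neighbors_nodup (row col : Int) (grid : List (List String)) :
    (get_neighbors row col grid).Nodup := by
  refine List.Nodup.sublist (pv_neighbors_sublist row col grid) ?_
  simp [List.nodup_cons, Prod.ext_iff]
  try omega

theorem pv_unknown_nodup (row col : Int) (grid : List (List String)) :
    (get_unknown_neighbors row col grid).Nodup := by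
  cases grid with
  | nil => simp [get_unknown_neighbors]
  | cons r0 rest =>
    by_cases h : r0 = []
    · simp [get_unknown_neighbors, h]
    · simp only [get_unknown_neighbors, if_neg h]
      exact (pv_neighbors_nodup row col (r0 :: rest)).filter _

-- the cell coordinates in pvCells are pairwise distinct
theorem pv_cells_nodup (grid : List (List String)) :
    ((pvCells grid).map (fun t => (t.1, t.2.1))).Nodup := by
  unfold pvCells
  rw [List.map_flatMap]
  rw [List.nodup_flatMap]
  constructor
  · intro p _
    rw [List.map_map]
    have hpw := PySem.List.pairwise_lt_enumerate p.2 0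
    have : List.Pairwise (fun u v : (Int × Int) => u ≠ v)
        ((PySem.List.enumerate p.2 0).map ((fun t : Int × Int × String => (t.1, t.2.1)) ∘ (fun q => (p.1, q.1, q.2)))) := by
      rw [List.pairwise_map]
      refine hpw.imp ?_
      intro a b hlt
      simp only [Function.comp, ne_eq, Prod.mk.injEq]
      rintro ⟨-, h2⟩
      omega
    exact this
  · have hpw := PySem.List.pairwise_lt_enumerate grid 0
    refine hpw.imp ?_
    intro a b hlt x hxa hxb
    simp only [List.map_map, List.mem_map] at hxa hxb
    obtain ⟨qa, -, rfl⟩ := hxa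
    obtain ⟨qb, -, hEq⟩ := hxb
    have : b.1 = a.1 := (Prod.mk.injEq _ _ _ _).mp hEq |>.1
    omega

-- two-element set facts
theorem pv_lkey_eq_iff (a b c d : Int × Int) (hab : a ≠ b) (hcd : c ≠ d) :
    pvLkey c d = pvLkey a b ↔ ((a = c ∧ b = d) ∨ (a = d ∧ b = c)) := by
  obtain ⟨a1, a2⟩ := a; obtain ⟨b1, b2⟩ := b; obtain ⟨c1, c2⟩ := c; obtain ⟨d1, d2⟩ := d
  simp only [pvLkey, Prod.ext_iff, ne_eq, not_and] at *
  split_ifs <;> simp_all <;> omega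

theorem pv_inter2_len_iff (a b c d : Int × Int) (hab : a ≠ b) (hcd : c ≠ d) :
    PySem.Set.len (PySem.Set.inter (PySem.Set.ofList [a, b]) (PySem.Set.ofList [c, d])) = 2
    ↔ ((a = c ∧ b = d) ∨ (a = d ∧ b = c)) := by
  have hof : PySem.Set.ofList [a, b] = [a, b] := by
    simp [PySem.Set.ofList, PySem.Set.add, PySem.Set.empty, PySem.Set.contains, hab.symm]
  have hof2 : PySem.Set.ofList [c, d] = [c, d] := by
    simp [PySem.Set.ofList, PySem.Set.add, PySem.Set.empty, PySem.Set.contains, hcd.symm]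
  rw [hof, hof2]
  simp only [PySem.Set.inter, PySem.Set.len, PySem.Set.contains]
  by_cases h1 : a = c <;> by_cases h2 : a = d <;> by_cases h3 : b = c <;> by_cases h4 : b = d <;>
    simp_all [List.filter]

theorem pv_inter2_eq (a b c d : Int × Int) (hab : a ≠ b) (hcd : c ≠ d)
    (h : (a = c ∧ b = d) ∨ (a = d ∧ b = c)) :
    PySem.Set.inter (PySem.Set.ofList [a, b]) (PySem.Set.ofList [c, d]) = [a, b] := by
  have hof : PySem.Set.ofList [a, b] = [a, b] := by
    simp [PySem.Set.ofList, PySem.Set.add, PySem.Set.empty, PySem.Set.contains, hab.symm]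
  have hof2 : PySem.Set.ofList [c, d] = [c, d] := by
    simp [PySem.Set.ofList, PySem.Set.add, PySem.Set.empty, PySem.Set.contains, hcd.symm]
  rw [hof, hof2]
  simp only [PySem.Set.inter, PySem.Set.contains]
  rcases h with ⟨rfl, rfl⟩ | ⟨rfl, rfl⟩ <;> simp [List.filter]

-- in a list with distinct cell keys, 'another element with property p' = 'at least 2 with p'
theorem pv_exists_other_iff (l : List (Int × Int × String)) (x : Int × Int × String)
    (hnd : (l.map (fun t => (t.1, t.2.1))).Nodup) (hx : x ∈ l)
    (p : Int × Int × String → Bool) (hpx : p x = true) :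
    (∃ t ∈ l, (x.1, x.2.1) ≠ (t.1, t.2.1) ∧ p t = true) ↔ 2 ≤ l.countP p := by
  have hinj := List.inj_on_of_nodup_map hnd
  have hndl : l.Nodup := List.Nodup.of_map _ hnd
  have hfil : (l.filter p).Nodup := hndl.filter _
  constructor
  · rintro ⟨t, ht, hne, hpt⟩
    have hxf : x ∈ l.filter p := List.mem_filter.mpr ⟨hx, hpx⟩
    have htf : t ∈ l.filter p := List.mem_filter.mpr ⟨ht, hpt⟩
    have hxt : x ≠ t := fun hEq => hne (by rw [hEq])
    rw [List.countP_eq_length_filter]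
    have hsub : ({x, t} : Finset (Int × Int × String)) ⊆ (l.filter p).toFinset := by
      intro y hy
      simp only [Finset.mem_insert, Finset.mem_singleton] at hy
      rcases hy with rfl | rfl
      · exact List.mem_toFinset.mpr hxf
      · exact List.mem_toFinset.mpr htf
    calc 2 = ({x, t} : Finset (Int × Int × String)).card := by
            rw [Finset.card_insert_of_notMem (by simp [hxt]), Finset.card_singleton]
    _ ≤ (l.filter p).toFinset.card := Finset.card_le_card hsub
    _ = (l.filter p).length := List.toFinset_card_of_nodup hfil
  · intro h2
    rw [List.countP_eq_length_filter] at h2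
    match hm : l.filter p with
    | [] => rw [hm] at h2; simp at h2
    | [a] => rw [hm] at h2; simp at h2
    | a :: b :: rest =>
      have hab : a ≠ b := by
        have hf2 := hfil
        rw [hm] at hf2
        rcases hf2 with _ | ⟨hna, _⟩
        · exact fun hEq => (by simp [hEq] at hna)
      have ha : a ∈ l.filter p := by rw [hm]; simp
      have hb : b ∈ l.filter p := by rw [hm]; simp
      by_cases hax : a = x
      · refine ⟨b, (List.mem_filter.mp hb).1, ?_, (List.mem_filter.mp hb).2⟩
        intro hkey
        exact hab (by rw [hax]; exact hinj hx (List.mem_filter.mp hb).1 hkey ▸ rfl)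
      · refine ⟨a, (List.mem_filter.mp ha).1, ?_, (List.mem_filter.mp ha).2⟩
        intro hkey
        exact hax (hinj (List.mem_filter.mp ha).1 hx hkey.symm)

-- B's first loop builds (counter of keys, list of qualifying unknown pairs)
theorem pv_foldB (grid : List (List String)) (l : List (Int × Int × String))
    (d : PySem.Dict ((Int × Int) × (Int × Int)) Int) (es : List (List (Int × Int))) :
    l.foldl (pvStepB grid) (d, es)
    = (((l.filterMap (pvEntry grid)).map pvKey).foldl
        (fun d k => d.insert k (d.getD k 0 + 1)) d,
       es ++ l.filterMap (pvEntry grid)) := by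
  induction l generalizing d es with
  | nil => simp
  | cons t tl ih =>
    simp only [List.foldl_cons, List.filterMap_cons]
    by_cases hq : pvQual grid t = true
    · have hq' := hq
      simp only [pvQual, Bool.and_eq_true, decide_eq_true_eq] at hq'
      obtain ⟨⟨ht2, hlen⟩, hf⟩ := hq'
      obtain ⟨a, b, hu⟩ := List.length_eq_two.mp hlen
      have hu' : get_unknown_neighbors t.1 t.2.1 grid = [a, b] := hu
      have hstep : pvStepB grid (d, es) t
          = (d.insert (pvLkey a b) (d.getD (pvLkey a b) 0 + 1), es ++ [pvUnk grid t]) := by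
        simp only [pvStepB, if_pos ht2, hu']
        rw [if_pos ⟨by rw [← hu']; exact hlen, hf⟩]
        simp [pvLkey]
        exact hu'.symm
      rw [hstep, ih]
      have hkey : pvKey (pvUnk grid t) = pvLkey a b := by rw [hu]; rfl
      simp [pvEntry, hq, hkey, List.append_assoc]
    · have hstep : pvStepB grid (d, es) t = (d, es) := by
        simp only [pvStepB]
        by_cases ht2 : t.2.2 = "2"
        · rw [if_pos ht2]
          have hno : ¬((get_unknown_neighbors t.1 t.2.1 grid).length = 2 ∧
              count_neighbors t.1 t.2.1 grid "F" = 0) := by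
            intro ⟨h1, h2⟩
            exact hq (by simp [pvQual, pvUnk, ht2, h1, h2])
          rw [if_neg hno]
        · rw [if_neg ht2]
      rw [hstep, ih]
      simp [pvEntry, hq]

-- every member of pvQ is a two-element Nodup unknown list coming from a qualifying cell
theorem pv_mem_pvQ (grid : List (List String)) {u : List (Int × Int)} (hu : u ∈ pvQ grid) :
    ∃ a b, u = [a, b] ∧ a ≠ b ∧ pvKey u = pvLkey a b := by
  obtain ⟨t, ht, he⟩ := List.mem_filterMap.mp hu
  unfold pvEntry at he
  by_cases h : pvQual grid t = true
  · rw [if_pos h] at he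
    injection he with he
    have h' := h
    simp only [pvQual, Bool.and_eq_true, decide_eq_true_eq] at h'
    have hlen : u.length = 2 := by rw [← he]; exact h'.1.2
    obtain ⟨a, b, rfl⟩ := List.length_eq_two.mp hlen
    have hnd : ([a, b] : List (Int × Int)).Nodup := by
      rw [← he]; exact pv_unknown_nodup t.1 t.2.1 grid
    have hab : a ≠ b := by simp [List.nodup_cons] at hnd; exact hnd
    exact ⟨a, b, rfl, hab, rfl⟩
  · rw [if_neg h] at he; cases he

-- the counter built by B's first loop counts matching qualifying cells
theorem pv_groups_cnt (grid : List (List String)) (u : List (Int × Int)) :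
    (((pvQ grid).map pvKey).foldl (fun d k => d.insert k (d.getD k 0 + 1))
        PySem.Dict.empty).getD (pvKey u) 0 = (pvCnt grid u : Int) := by
  rw [PySem.Dict.getD_foldl_insert_add_one, PySem.Dict.getD_empty]
  rw [List.count_eq_countP, List.countP_map]
  unfold pvQ pvCnt
  rw [List.countP_filterMap]
  norm_num
  apply List.countP_congr
  intro t _
  by_cases h : pvQual grid t = true <;> simp [pvEntry, h, Function.comp]

theorem pv_foldl_id {α σ : Type} (l : List α) (f : σ → α → σ) (s : σ)
    (h : ∀ s, ∀ x ∈ l, f s x = s) : l.foldl f s = s := by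
  induction l generalizing s with
  | nil => rfl
  | cons hd tl ih =>
    rw [List.foldl_cons, h s hd List.mem_cons_self]
    exact ih s (fun s x hx => h s x (List.mem_cons_of_mem _ hx))

-- a row without '2' contributes nothing to B's first loop
theorem pv_row_skip (grid : List (List String)) (p : Int × List String)
    (hc : ¬(p.2.contains "2" = true))
    (st : PySem.Dict ((Int × Int) × (Int × Int)) Int × List (List (Int × Int))) :
    (PySem.List.enumerate p.2 0).foldl (fun st q => pvStepB grid st (p.1, q.1, q.2)) st = st := by
  have hmem : ¬("2" ∈ p.2) := by simpa using hc
  apply pv_foldl_id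
  intro s q hq
  obtain ⟨k, hk, rfl⟩ := (PySem.List.mem_enumerate_iff _ _ _).mp hq
  have hne : ¬(((p.1, (0 : Int) + (k : Int), p.2[k]) : Int × Int × String).2.2 = "2") := by
    intro h
    exact hmem (h ▸ List.getElem_mem hk)
  simp only [pvStepB, if_neg hne]

-- B's port produces ([], pvMines grid)
theorem pv_alt_eq (grid : List (List String)) :
    detect_2_2_pattern_alt grid = ([], pvMines grid) := by
  have h1 : detect_2_2_pattern_alt grid =
      (let st := (pvCells grid).foldl (pvStepB grid) (PySem.Dict.empty, ([] : List (List (Int × Int))));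
       ([], st.2.foldl (fun mines unknown =>
          match unknown with
          | [a, b] =>
            let key := if a.1 < b.1 ∨ (a.1 = b.1 ∧ a.2 ≤ b.2) then (a, b) else (b, a)
            if st.1.getD key 0 ≥ 2 then PySem.Set.update mines unknown else mines
          | _ => mines) PySem.Set.empty)) := by
    rw [← pv_nested_eq grid (pvStepB grid) (PySem.Dict.empty, [])]
    have hg : (PySem.List.enumerate grid 0).foldl
        (fun st p => if p.2.contains "2" then
            (PySem.List.enumerate p.2 0).foldl (fun st q => pvStepB grid st (p.1, q.1, q.2)) st
          else st) (PySem.Dict.empty, [])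
        = (PySem.List.enumerate grid 0).foldl
        (fun st p => (PySem.List.enumerate p.2 0).foldl (fun st q => pvStepB grid st (p.1, q.1, q.2)) st)
        (PySem.Dict.empty, []) := by
      apply PySem.List.foldl_congr_mem
      intro st p _
      by_cases hc : p.2.contains "2" = true
      · rw [if_pos hc]
      · rw [if_neg hc, pv_row_skip grid p hc st]
    rw [← hg]
    rfl
  rw [h1, pv_foldB]
  simp only [List.nil_append]
  refine Prod.ext rfl ?_
  show (pvQ grid).foldl _ _ = _
  unfold pvMines
  apply PySem.List.foldl_congr_mem
  intro acc u hu
  obtain ⟨a, b, rfl, hab, hkey⟩ := pv_mem_pvQ grid hu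
  conv_lhs => whnf
  rw [show List.filterMap (pvEntry grid) (pvCells grid) = pvQ grid from rfl]
  rw [show (if a.1 < b.1 ∨ (a.1 = b.1 ∧ a.2 ≤ b.2) then (a, b) else (b, a)) = pvLkey a b from rfl]
  rw [← hkey, pv_groups_cnt]
  have hcond : ((pvCnt grid [a, b] : Int) ≥ 2) ↔ (2 ≤ pvCnt grid [a, b]) := by
    constructor <;> intro h <;> exact_mod_cast h
  show (if ((pvCnt grid [a, b] : Int)) ≥ 2 then PySem.Set.update acc [a, b] else acc) = _
  rw [if_congr hcond rfl rfl]

def pvStepA (grid : List (List String)) (mines : PySem.Set (Int × Int))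
    (t1 : Int × Int × String) : PySem.Set (Int × Int) :=
  if t1.2.2 = "2" then
    (PySem.List.enumerate grid 0).foldl (fun mines p2 =>
      (PySem.List.enumerate p2.2 0).foldl
        (fun mines q2 => pvInner grid t1 mines (p2.1, q2.1, q2.2)) mines) mines
  else mines

theorem pv_pvUnk_nodup (grid : List (List String)) (t : Int × Int × String) :
    (pvUnk grid t).Nodup := pv_unknown_nodup t.1 t.2.1 grid

-- A's inner-loop body is a conditional update with t1's own unknown pair
theorem pv_inner_eq (grid : List (List String)) (t1 t2 : Int × Int × String)
    (m : PySem.Set (Int × Int)) :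
    pvInner grid t1 m t2 = if pvC grid t1 t2 = true then PySem.Set.update m (pvUnk grid t1) else m := by
  simp only [pvInner]
  by_cases h2 : (t2.2.2 = "2" ∧ (t1.1, t1.2.1) ≠ (t2.1, t2.2.1))
  · rw [if_pos h2]
    by_cases hc5 : ((pvUnk grid t1).length = 2 ∧ (get_unknown_neighbors t2.1 t2.2.1 grid).length = 2 ∧
        PySem.Set.len (PySem.Set.inter (PySem.Set.ofList (pvUnk grid t1))
          (PySem.Set.ofList (get_unknown_neighbors t2.1 t2.2.1 grid))) = 2 ∧
        count_neighbors t1.1 t1.2.1 grid "F" = 0 ∧ count_neighbors t2.1 t2.2.1 grid "F" = 0)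
    · rw [if_pos hc5]
      obtain ⟨hl1, hl2, hlen, hf1, hf2⟩ := hc5
      have hCtrue : pvC grid t1 t2 = true := by
        simp only [pvC, pvUnk, Bool.and_eq_true, decide_eq_true_eq]
        exact ⟨⟨⟨⟨⟨⟨h2.1, h2.2⟩, hl1⟩, hl2⟩, hlen⟩, hf1⟩, hf2⟩
      rw [if_pos hCtrue]
      obtain ⟨a, b, hu1⟩ := List.length_eq_two.mp hl1
      obtain ⟨c, d, hu2⟩ := List.length_eq_two.mp hl2
      have hab : a ≠ b := by
        have := pv_pvUnk_nodup grid t1; rw [hu1] at this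
        simp [List.nodup_cons] at this; exact this
      have hcd : c ≠ d := by
        have := pv_unknown_nodup t2.1 t2.2.1 grid; rw [hu2] at this
        simp [List.nodup_cons] at this; exact this
      rw [hu1, hu2] at hlen ⊢
      rw [pv_inter2_eq a b c d hab hcd ((pv_inter2_len_iff a b c d hab hcd).mp hlen)]
    · rw [if_neg hc5]
      have hCfalse : ¬(pvC grid t1 t2 = true) := by
        intro hC
        simp only [pvC, pvUnk, Bool.and_eq_true, decide_eq_true_eq] at hC
        exact hc5 ⟨hC.1.1.1.1.2, hC.1.1.1.2, hC.1.1.2, hC.1.2, hC.2⟩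
      rw [if_neg hCfalse]
  · rw [if_neg h2]
    have hCfalse : ¬(pvC grid t1 t2 = true) := by
      intro hC
      simp only [pvC, pvUnk, Bool.and_eq_true, decide_eq_true_eq] at hC
      exact h2 ⟨hC.1.1.1.1.1.1, hC.1.1.1.1.1.2⟩
    rw [if_neg hCfalse]

-- A's pair condition holds for some other cell iff t1 qualifies and its key count is ≥ 2
theorem pv_cond_iff (grid : List (List String)) (t1 : Int × Int × String)
    (ht1 : t1 ∈ pvCells grid) :
    (t1.2.2 = "2" ∧ ∃ t2 ∈ pvCells grid, pvC grid t1 t2 = true)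
    ↔ (pvQual grid t1 = true ∧ 2 ≤ pvCnt grid (pvUnk grid t1)) := by
  constructor
  · rintro ⟨his2, t2, ht2, hC⟩
    simp only [pvC, Bool.and_eq_true, decide_eq_true_eq] at hC
    obtain ⟨⟨⟨⟨⟨⟨h2s, hne⟩, hl1⟩, hl2⟩, hlen⟩, hf1⟩, hf2⟩ := hC
    have hq1 : pvQual grid t1 = true := by
      simp only [pvQual, Bool.and_eq_true, decide_eq_true_eq]
      exact ⟨⟨his2, hl1⟩, hf1⟩
    refine ⟨hq1, ?_⟩
    have hp1 : (fun t => pvQual grid t && (pvKey (pvUnk grid t) == pvKey (pvUnk grid t1))) t1 = true := by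
      simp [hq1]
    refine (pv_exists_other_iff (pvCells grid) t1 (pv_cells_nodup grid) ht1 _ hp1).mp ?_
    refine ⟨t2, ht2, hne, ?_⟩
    have hq2 : pvQual grid t2 = true := by
      simp only [pvQual, Bool.and_eq_true, decide_eq_true_eq]
      exact ⟨⟨h2s, hl2⟩, hf2⟩
    obtain ⟨a, b, hu1⟩ := List.length_eq_two.mp hl1
    obtain ⟨c, d, hu2⟩ := List.length_eq_two.mp hl2
    have hab : a ≠ b := by
      have := pv_pvUnk_nodup grid t1; rw [hu1] at this
      simp [List.nodup_cons] at this; exact this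
    have hcd : c ≠ d := by
      have := pv_pvUnk_nodup grid t2; rw [hu2] at this
      simp [List.nodup_cons] at this; exact this
    rw [hu1, hu2] at hlen
    have hkey : pvKey (pvUnk grid t2) = pvKey (pvUnk grid t1) := by
      rw [hu1, hu2]
      show pvLkey c d = pvLkey a b
      exact (pv_lkey_eq_iff a b c d hab hcd).mpr ((pv_inter2_len_iff a b c d hab hcd).mp hlen)
    simp [hq2, hkey]
  · rintro ⟨hq1, hcnt⟩
    simp only [pvQual, Bool.and_eq_true, decide_eq_true_eq] at hq1
    obtain ⟨⟨his2, hl1⟩, hf1⟩ := hq1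
    refine ⟨his2, ?_⟩
    have hq1' : pvQual grid t1 = true := by
      simp only [pvQual, Bool.and_eq_true, decide_eq_true_eq]
      exact ⟨⟨his2, hl1⟩, hf1⟩
    have hp1 : (fun t => pvQual grid t && (pvKey (pvUnk grid t) == pvKey (pvUnk grid t1))) t1 = true := by
      simp [hq1']
    obtain ⟨t2, ht2, hne, hp2⟩ :=
      (pv_exists_other_iff (pvCells grid) t1 (pv_cells_nodup grid) ht1 _ hp1).mpr hcnt
    simp only [Bool.and_eq_true, beq_iff_eq] at hp2
    obtain ⟨hq2, hkey⟩ := hp2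
    simp only [pvQual, Bool.and_eq_true, decide_eq_true_eq] at hq2
    obtain ⟨⟨h2s, hl2⟩, hf2⟩ := hq2
    refine ⟨t2, ht2, ?_⟩
    obtain ⟨a, b, hu1⟩ := List.length_eq_two.mp hl1
    obtain ⟨c, d, hu2⟩ := List.length_eq_two.mp hl2
    have hab : a ≠ b := by
      have := pv_pvUnk_nodup grid t1; rw [hu1] at this
      simp [List.nodup_cons] at this; exact this
    have hcd : c ≠ d := by
      have := pv_pvUnk_nodup grid t2; rw [hu2] at this
      simp [List.nodup_cons] at this; exact this
    have hlen : PySem.Set.len (PySem.Set.inter (PySem.Set.ofList (pvUnk grid t1))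
        (PySem.Set.ofList (pvUnk grid t2))) = 2 := by
      rw [hu1, hu2]
      refine (pv_inter2_len_iff a b c d hab hcd).mpr ?_
      refine (pv_lkey_eq_iff a b c d hab hcd).mp ?_
      rw [hu1, hu2] at hkey
      exact hkey
    simp only [pvC, Bool.and_eq_true, decide_eq_true_eq]
    exact ⟨⟨⟨⟨⟨⟨h2s, hne⟩, hl1⟩, hl2⟩, hlen⟩, hf1⟩, hf2⟩

-- A's port produces ([], pvMines grid)
theorem pv_a_eq (grid : List (List String)) :
    detect_2_2_pattern grid = ([], pvMines grid) := by
  cases grid with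
  | nil => rfl
  | cons r0 rest =>
    by_cases h0 : r0 = []
    · subst h0
      have hQ : pvQ ([] :: rest) = [] := by
        unfold pvQ
        rw [List.filterMap_eq_nil_iff]
        intro t ht
        have hunk : pvUnk ([] :: rest) t = [] := by
          show get_unknown_neighbors t.1 t.2.1 ([] :: rest) = []
          simp [get_unknown_neighbors]
        simp [pvEntry, pvQual, hunk]
      simp [detect_2_2_pattern, pvMines, hQ]
    · have h1 : detect_2_2_pattern (r0 :: rest)
          = ([], (pvCells (r0 :: rest)).foldl (pvStepA (r0 :: rest)) PySem.Set.empty) := by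
        rw [← pv_nested_eq (r0 :: rest) (pvStepA (r0 :: rest)) PySem.Set.empty]
        simp only [detect_2_2_pattern]
        rw [if_neg h0]
        rfl
      rw [h1]
      refine Prod.ext rfl ?_
      show (pvCells (r0 :: rest)).foldl (pvStepA (r0 :: rest)) [] = pvMines (r0 :: rest)
      trans ((pvCells (r0 :: rest)).foldl (fun m t => if pvQual (r0 :: rest) t = true then
          (if 2 ≤ pvCnt (r0 :: rest) (pvUnk (r0 :: rest) t) then PySem.Set.update m (pvUnk (r0 :: rest) t) else m)
        else m) [])
      · apply PySem.List.foldl_congr_mem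
        intro acc t1 ht1
        unfold pvStepA
        by_cases his2 : t1.2.2 = "2"
        · rw [if_pos his2]
          rw [pv_nested_eq (r0 :: rest) (pvInner (r0 :: rest) t1) acc]
          rw [PySem.List.foldl_congr_mem (pvCells (r0 :: rest)) _
            (fun m t2 => if pvC (r0 :: rest) t1 t2 = true then PySem.Set.update m (pvUnk (r0 :: rest) t1) else m)
            acc (fun m t2 ht2 => pv_inner_eq (r0 :: rest) t1 t2 m)]
          rw [pv_foldl_if_update]
          by_cases hex : ∃ t2 ∈ pvCells (r0 :: rest), pvC (r0 :: rest) t1 t2 = true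
          · rw [if_pos hex]
            obtain ⟨hq, hc⟩ := (pv_cond_iff (r0 :: rest) t1 ht1).mp ⟨his2, hex⟩
            rw [if_pos hq, if_pos hc]
          · rw [if_neg hex]
            by_cases hq : pvQual (r0 :: rest) t1 = true
            · rw [if_pos hq]
              by_cases hc : 2 ≤ pvCnt (r0 :: rest) (pvUnk (r0 :: rest) t1)
              · exact absurd ((pv_cond_iff (r0 :: rest) t1 ht1).mpr ⟨hq, hc⟩).2 hex
              · rw [if_neg hc]
            · rw [if_neg hq]
        · rw [if_neg his2]
          have hqf : ¬(pvQual (r0 :: rest) t1 = true) := by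
            intro hq
            simp only [pvQual, Bool.and_eq_true, decide_eq_true_eq] at hq
            exact his2 hq.1.1
          rw [if_neg hqf]
      · rw [pv_foldl_filterMap_if (pvCells (r0 :: rest)) (pvQual (r0 :: rest)) (pvUnk (r0 :: rest))
          (fun m u => if 2 ≤ pvCnt (r0 :: rest) u then PySem.Set.update m u else m) []]
        rfl

-- ===== VERDICT (by name: the statement is the Claim_ definition above) =====
theorem detect_2_2_pattern_spec : Claim_equal_detect_2_2_pattern := by
  intro grid _ _
  unfold Spec_detect_2_2_pattern
  rw [pv_a_eq, pv_alt_eq]
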